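-- pv_equiv track=rewrite | github.com/bomzheg/Cylinders | cylinders/services/batch_info.py | convert_cylinders_to_tree
-- ===== SOURCE A (Python) =====
-- def convert_cylinders_to_tree(cylinders: dict) -> dict:
--     """
--     конвертирует словарь из словаря по ID упаковки в словарь по давлению и типу
--     """
--     rez_tree = {}
--     for id_ in cylinders:
--         pressure = cylinders[id_]['pressure']
--         if pressure not in rez_tree:
--             rez_tree[pressure] = {}
--         single = cylinders[id_]['count_in_mono'] == 1
--         if single not in rez_tree[pressure]:
--             rez_tree[pressure][single] = {}
--         rez_tree[pressure][single][id_] = cylinders[id_]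
--     return rez_tree
-- ===== SOURCE B (Python) =====
-- def convert_cylinders_to_tree(cylinders: dict) -> dict:
--     """
--     конвертирует словарь из словаря по ID упаковки в словарь по давлению и типу
--     """
--     items = list(cylinders.items())
--     pressures = list(dict.fromkeys(c['pressure'] for _, c in items))
--     return {
--         p: {
--             s: {i: c for i, c in items
--                 if c['pressure'] == p and (c['count_in_mono'] == 1) == s}
--             for s in list(dict.fromkeys(c['count_in_mono'] == 1
--                                         for _, c in items if c['pressure'] == p))
--         }
--         for p in pressures
--     }
-- ===== Notes on version B (the rewrite author's own statement) =====
-- stated objective: alternative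
-- what changed: Replaces the single-pass incremental nested-dict mutation with a declarative group-by-filtering pipeline: dedup the pressures, per pressure dedup the 'single' flags, and build each leaf dict by one filtering comprehension over the items. (Pre_ also excludes assoc lists with duplicate keys, which no Python dict input can represent, and inputs missing 'pressure'/'count_in_mono', on which A raises KeyError).
import Mathlib
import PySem

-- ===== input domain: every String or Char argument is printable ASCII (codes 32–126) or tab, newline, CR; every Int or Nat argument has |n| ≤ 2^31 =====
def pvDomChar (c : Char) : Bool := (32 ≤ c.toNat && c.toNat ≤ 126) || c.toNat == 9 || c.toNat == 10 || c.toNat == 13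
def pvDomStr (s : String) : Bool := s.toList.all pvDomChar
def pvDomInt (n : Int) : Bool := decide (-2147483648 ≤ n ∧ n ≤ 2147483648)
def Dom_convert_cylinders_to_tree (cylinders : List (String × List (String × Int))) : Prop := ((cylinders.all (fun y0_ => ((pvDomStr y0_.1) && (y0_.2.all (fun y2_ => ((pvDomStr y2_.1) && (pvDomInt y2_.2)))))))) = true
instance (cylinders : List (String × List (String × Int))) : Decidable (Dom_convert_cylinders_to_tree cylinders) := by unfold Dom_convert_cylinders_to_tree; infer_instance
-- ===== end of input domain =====

-- B replaces A's single-pass nested-dict mutation by a declarative group-by-filtering pipeline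
-- (dedup the pressures, per pressure dedup the 'single' flags, build each leaf by one filter);
-- objective: alternative — a genuinely different construction of the same tree, not claimed faster.

-- c[k] for a cylinder dict c; the 0 default marks KeyError, which Pre_ excludes (unreachable there)
def pvPget (c : List (String × Int)) (k : String) : Int := ((PySem.Dict.mk c).get? k).getD 0

-- ===== PORT A =====
-- A's loop body, literally: look the cylinder up, ensure the pressure and single buckets
-- exist, then store the cylinder under its id (Python mutates rez_tree[pressure] in place;
-- here the updated sub-dict is written back with one insert, which lands on the same key).
def pvLoopA (cylinders : List (String × List (String × Int)))
    (rez_tree : PySem.Dict Int (PySem.Dict Bool (PySem.Dict String (List (String × Int)))))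
    (id_ : String) : PySem.Dict Int (PySem.Dict Bool (PySem.Dict String (List (String × Int)))) :=
  let cyl := ((PySem.Dict.mk cylinders).get? id_).getD []   -- cylinders[id_]; id_ is a key, never none
  let pressure := pvPget cyl "pressure"
  let rez_tree := if rez_tree.contains pressure then rez_tree else rez_tree.insert pressure PySem.Dict.empty
  let single := pvPget cyl "count_in_mono" == 1
  let sub := (rez_tree.get? pressure).getD PySem.Dict.empty
  let sub := if sub.contains single then sub else sub.insert single PySem.Dict.empty
  let inner := (sub.get? single).getD PySem.Dict.empty
  rez_tree.insert pressure (sub.insert single (inner.insert id_ cyl))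

def convert_cylinders_to_tree (cylinders : List (String × List (String × Int))) : List (Int × List (Bool × List (String × List (String × Int)))) :=
  let rez_tree := (cylinders.map Prod.fst).foldl (pvLoopA cylinders) PySem.Dict.empty
  rez_tree.items.map (fun ps => (ps.1, ps.2.items.map (fun si => (si.1, si.2.items))))

-- ===== PORT B =====
-- transliteration of Source B: list(dict.fromkeys(…)) is PySem.List.dedup; the dict comprehensions
-- run over lists of DISTINCT keys (dedup output / unique ids under Pre_), so each is a map/filter.
def convert_cylinders_to_tree_alt (cylinders : List (String × List (String × Int))) : List (Int × List (Bool × List (String × List (String × Int)))) :=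
  let items := cylinders
  let pressures := PySem.List.dedup (items.map (fun ic => pvPget ic.2 "pressure"))
  pressures.map (fun p =>
    (p, (PySem.List.dedup ((items.filter (fun ic => pvPget ic.2 "pressure" == p)).map
            (fun ic => pvPget ic.2 "count_in_mono" == 1))).map (fun s =>
      (s, items.filter (fun ic => (pvPget ic.2 "pressure" == p) && ((pvPget ic.2 "count_in_mono" == 1) == s))))))

-- ===== PRECONDITION & SPEC =====
-- Pre_ excludes (a) association lists with duplicate keys — outer ids or keys inside one cylinder —
-- which a Python dict collapses before A even runs, so they have no faithful assoc-list meaning;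
-- (b) cylinders missing the "pressure" or "count_in_mono" key, on which A raises KeyError.
def Pre_convert_cylinders_to_tree (cylinders : List (String × List (String × Int))) : Prop :=
  (cylinders.map Prod.fst).Nodup ∧
  ∀ e ∈ cylinders, (e.2.map Prod.fst).Nodup ∧
    ((PySem.Dict.mk e.2).get? "pressure").isSome ∧ ((PySem.Dict.mk e.2).get? "count_in_mono").isSome
instance (cylinders : List (String × List (String × Int))) : Decidable (Pre_convert_cylinders_to_tree cylinders) := by unfold Pre_convert_cylinders_to_tree; infer_instance

def pvWitness_convert_cylinders_to_tree : (List (String × List (String × Int))) :=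
  [("a", [("pressure", 10), ("count_in_mono", 1)]),
   ("b", [("pressure", 10), ("count_in_mono", 4)]),
   ("c", [("pressure", 150), ("count_in_mono", 1)])]

def Spec_convert_cylinders_to_tree (cylinders : List (String × List (String × Int))) (out : List (Int × List (Bool × List (String × List (String × Int))))) : Prop := out = convert_cylinders_to_tree_alt cylinders
instance (cylinders : List (String × List (String × Int))) (out : List (Int × List (Bool × List (String × List (String × Int))))) : Decidable (Spec_convert_cylinders_to_tree cylinders out) := by
  unfold Spec_convert_cylinders_to_tree
  letI : DecidableEq (List (Bool × List (String × List (String × Int)))) :=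
    fun x y => (inferInstance : Decidable (x = y))
  infer_instance

-- ===== CLAIM (what is proved, stated in full; the proofs are below) =====
def Claim_equal_convert_cylinders_to_tree : Prop := ∀ (cylinders : List (String × List (String × Int))), Dom_convert_cylinders_to_tree cylinders → Pre_convert_cylinders_to_tree cylinders → Spec_convert_cylinders_to_tree cylinders (convert_cylinders_to_tree cylinders)

-- ===== LEMMAS AND PROOFS =====

-- the two grouping keys of the tree
def pvP (e : String × List (String × Int)) : Int := pvPget e.2 "pressure"
def pvS (e : String × List (String × Int)) : Bool := pvPget e.2 "count_in_mono" == 1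

def pvGrp {α κ γ : Type} [BEq κ] (keyf : α → κ) (body : List α → γ) (l : List α) : PySem.Dict κ γ :=
  PySem.Dict.mk ((PySem.List.dedup (l.map keyf)).map (fun k => (k, body (l.filter (fun e => keyf e == k)))))



-- A's loop body acting on the entry itself (valid because the ids are unique, pv_foldA_entries)
def pvStep (t : PySem.Dict Int (PySem.Dict Bool (PySem.Dict String (List (String × Int)))))
    (e : String × List (String × Int)) : PySem.Dict Int (PySem.Dict Bool (PySem.Dict String (List (String × Int)))) :=
  let cyl := e.2
  let pressure := pvPget cyl "pressure"
  let t := if t.contains pressure then t else t.insert pressure PySem.Dict.empty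
  let single := pvPget cyl "count_in_mono" == 1
  let sub := (t.get? pressure).getD PySem.Dict.empty
  let sub := if sub.contains single then sub else sub.insert single PySem.Dict.empty
  let inner := (sub.get? single).getD PySem.Dict.empty
  t.insert pressure (sub.insert single (inner.insert e.1 cyl))

lemma pv_get?_mk_map {κ γ : Type} [BEq κ] [LawfulBEq κ]
    (ks : List κ) (g : κ → γ) (k : κ) :
    (PySem.Dict.mk (ks.map (fun k => (k, g k)))).get? k
      = if k ∈ ks then some (g k) else none := by
  induction ks with
  | nil => simp [PySem.Dict.get?]
  | cons a t ih =>
    rw [List.map_cons, PySem.Dict.get?_mk_cons]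
    by_cases h : a = k
    · simp [h]
    · simp [h, ih, Ne.symm h]

lemma pv_filter_eq_nil {α κ : Type} [BEq κ] [LawfulBEq κ] (keyf : α → κ) (l : List α) (k : κ)
    (h : k ∉ l.map keyf) : l.filter (fun e => keyf e == k) = [] := by
  rw [List.filter_eq_nil_iff]
  intro a ha
  simp only [beq_iff_eq]
  intro hk
  exact h (List.mem_map.mpr ⟨a, ha, hk⟩)

-- adding one element on the right updates exactly its group, in A's check-then-insert shape
lemma pvGrp_append {α κ γ : Type} [BEq κ] [LawfulBEq κ]
    (keyf : α → κ) (body : List α → γ) (f : γ → γ) (dflt : γ) (e : α) (l : List α)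
    (hdflt : body [] = dflt)
    (hstep : ∀ q : α → Bool, body ((l.filter q) ++ [e]) = f (body (l.filter q))) :
    pvGrp keyf body (l ++ [e]) =
      (let t := pvGrp keyf body l
       let t := if t.contains (keyf e) then t else t.insert (keyf e) dflt
       t.insert (keyf e) (f ((t.get? (keyf e)).getD dflt))) := by
  have hked : PySem.List.dedup ((l ++ [e]).map keyf)
      = PySem.Set.add (PySem.List.dedup (l.map keyf)) (keyf e) := by
    simp [PySem.Set.ofList_append_singleton]
  by_cases hk : keyf e ∈ l.map keyf
  · -- existing group
    have hkd : keyf e ∈ PySem.List.dedup (l.map keyf) := by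
      simpa [PySem.List.mem_dedup] using hk
    have hcont : (pvGrp keyf body l).contains (keyf e) = true := by
      rw [PySem.Dict.contains_iff_mem_keys]
      simpa [pvGrp, PySem.Dict.keys_mk, List.map_map] using hkd
    have hget : (pvGrp keyf body l).get? (keyf e)
        = some (body (l.filter (fun x => keyf x == keyf e))) := by
      rw [pvGrp, pv_get?_mk_map, if_pos hkd]
    simp only [hcont, if_true, hget, Option.getD_some]
    apply PySem.Dict.ext
    rw [PySem.Dict.items_insert_of_contains _ _ hcont]
    simp only [pvGrp, hked, PySem.Set.add_of_mem hkd]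
    rw [List.map_map]
    apply List.map_congr_left
    intro k hkmem
    by_cases hkk : k = keyf e
    · subst hkk
      simp only [Function.comp, beq_self_eq_true, if_true]
      rw [List.filter_append, show [e].filter (fun x => keyf x == keyf e) = [e] by simp,
        hstep (fun x => keyf x == keyf e)]
    · simp only [Function.comp]
      rw [if_neg (by simpa using hkk)]
      have he : (keyf e == k) = false := by simpa using fun h => hkk h.symm
      rw [List.filter_append]
      simp [he]
  · -- new group
    have hkd : keyf e ∉ PySem.List.dedup (l.map keyf) := by
      simpa [PySem.List.mem_dedup] using hk
    have hcont : (pvGrp keyf body l).contains (keyf e) = false := by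
      rw [← Bool.not_eq_true, PySem.Dict.contains_iff_mem_keys]
      simpa [pvGrp, PySem.Dict.keys_mk, List.map_map] using hkd
    simp only [hcont, if_false, Bool.false_eq_true, PySem.Dict.insert_insert_self,
      PySem.Dict.get?_insert_self, Option.getD_some]
    apply PySem.Dict.ext
    rw [PySem.Dict.items_insert_of_not_contains _ _ hcont]
    simp only [pvGrp, hked, PySem.Set.add_of_not_mem hkd]
    rw [List.map_append]
    congr 1
    · apply List.map_congr_left
      intro k hkmem
      have hkk : (keyf e == k) = false := by
        have hkl : k ∈ l.map keyf := by simpa [PySem.List.mem_dedup] using hkmem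
        simpa using fun h => hk (by rw [h]; exact hkl)
      rw [List.filter_append]
      simp [hkk]
    · simp only [List.map_cons, List.map_nil]
      rw [List.filter_append, pv_filter_eq_nil _ _ _ hk]
      have hf : l.filter (fun _ => false) = [] := by simp
      have h2 := hstep (fun _ => false)
      rw [hf, hdflt] at h2
      simp only [List.nil_append] at h2 ⊢
      rw [show ([e].filter (fun x => keyf x == keyf e)) = [e] by simp, h2]
lemma pv_fold_eq (l : List (String × List (String × Int)))
    (hnd : (l.map Prod.fst).Nodup) :
    l.foldl pvStep PySem.Dict.empty
      = pvGrp pvP (fun sub => pvGrp pvS (fun inner => PySem.Dict.mk inner) sub) l := by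
  induction l using List.reverseRecOn with
  | nil => rfl
  | append_singleton l e ih =>
    have hnd2 : (l.map Prod.fst).Nodup ∧ e.1 ∉ l.map Prod.fst := by
      constructor
      · exact (List.nodup_append.mp (by simpa using hnd)).1
      · have := (List.nodup_append.mp (by simpa using hnd)).2.2
        intro hmem
        exact this e.1 hmem e.1 (List.mem_singleton.mpr rfl) rfl
    have hstep2 : ∀ q : (String × List (String × Int)) → Bool,
        (fun sub => pvGrp pvS (fun inner => PySem.Dict.mk inner) sub) ((l.filter q) ++ [e])
          = (fun sub =>
              let sub2 := if sub.contains (pvS e) then sub else sub.insert (pvS e) PySem.Dict.empty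
              sub2.insert (pvS e) (((sub2.get? (pvS e)).getD PySem.Dict.empty).insert e.1 e.2))
            ((fun sub => pvGrp pvS (fun inner => PySem.Dict.mk inner) sub) (l.filter q)) := by
      intro q
      have h2 : ∀ q2 : (String × List (String × Int)) → Bool,
          (fun inner => PySem.Dict.mk inner) (((l.filter q).filter q2) ++ [e])
            = (fun inner => inner.insert e.1 e.2)
              ((fun inner => PySem.Dict.mk inner) ((l.filter q).filter q2)) := by
        intro q2
        have hfresh : e.1 ∉ ((l.filter q).filter q2).map Prod.fst := by
          intro hmem
          obtain ⟨a, ha, hae⟩ := List.mem_map.mp hmem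
          exact hnd2.2 (List.mem_map.mpr
            ⟨a, List.mem_of_mem_filter (List.mem_of_mem_filter ha), hae⟩)
        have hcont : (PySem.Dict.mk ((l.filter q).filter q2)).contains e.1 = false := by
          rw [← Bool.not_eq_true, PySem.Dict.contains_iff_mem_keys]
          exact fun hmem => hfresh hmem
        apply PySem.Dict.ext
        rw [PySem.Dict.items_insert_of_not_contains _ _ hcont]
      exact pvGrp_append pvS (fun inner => PySem.Dict.mk inner)
        (fun inner => inner.insert e.1 e.2) PySem.Dict.empty e (l.filter q) rfl h2
    rw [List.foldl_append, List.foldl_cons, List.foldl_nil, ih hnd2.1]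
    rw [pvGrp_append pvP (fun sub => pvGrp pvS (fun inner => PySem.Dict.mk inner) sub)
        (fun sub =>
          let sub2 := if sub.contains (pvS e) then sub else sub.insert (pvS e) PySem.Dict.empty
          sub2.insert (pvS e) (((sub2.get? (pvS e)).getD PySem.Dict.empty).insert e.1 e.2))
        PySem.Dict.empty e l rfl hstep2]
    rfl

lemma pv_foldA_entries (cylinders : List (String × List (String × Int)))
    (hnd : (cylinders.map Prod.fst).Nodup) :
    convert_cylinders_to_tree cylinders
      = (cylinders.foldl pvStep PySem.Dict.empty).items.map
          (fun ps => (ps.1, ps.2.items.map (fun si => (si.1, si.2.items)))) := by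
  have h : (cylinders.map Prod.fst).foldl (pvLoopA cylinders) PySem.Dict.empty
      = cylinders.foldl pvStep PySem.Dict.empty := by
    rw [List.foldl_map]
    apply PySem.List.foldl_congr_mem
    intro acc x hx
    have hget : (PySem.Dict.mk cylinders).get? x.1 = some x.2 :=
      PySem.Dict.get?_of_mem_items _ (show (x.1, x.2) ∈ cylinders from hx)
        (by simpa [PySem.Dict.keys_mk] using hnd)
    simp only [pvLoopA, pvStep, hget, Option.getD_some]
  unfold convert_cylinders_to_tree
  rw [h]
lemma pv_conv_grp (cylinders : List (String × List (String × Int))) :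
    (pvGrp pvP (fun sub => pvGrp pvS (fun inner => PySem.Dict.mk inner) sub) cylinders).items.map
        (fun ps => (ps.1, ps.2.items.map (fun si => (si.1, si.2.items))))
      = convert_cylinders_to_tree_alt cylinders := by
  have hand : ∀ (p : Int) (s : Bool),
      (fun a : String × List (String × Int) => (pvS a == s) && (pvP a == p))
        = (fun a => (pvPget a.2 "pressure" == p) && ((pvPget a.2 "count_in_mono" == 1) == s)) := by
    intro p s
    funext a
    simp [pvP, pvS, Bool.and_comm]
  simp only [pvGrp, convert_cylinders_to_tree_alt, List.map_map]
  apply List.map_congr_left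
  intro p hp
  simp only [Function.comp]
  congr 1
  rw [List.map_map]
  apply List.map_congr_left
  intro s hs
  simp only [Function.comp]
  congr 1
  rw [List.filter_filter, hand p s]


-- ===== VERDICT (by name: the statement is the Claim_ definition above) =====
theorem convert_cylinders_to_tree_spec : Claim_equal_convert_cylinders_to_tree := by
  intro cylinders _ hpre
  unfold Spec_convert_cylinders_to_tree
  rw [pv_foldA_entries cylinders hpre.1, pv_fold_eq cylinders hpre.1, pv_conv_grp]
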